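-- pv_equiv track=rewrite | github.com/Oliviaetj/HGL-CC | datasets/mydata.py | T_or_F
-- ===== SOURCE A (Python) =====
-- def T_or_F(lt, d,a1,b1,c1):
--     a, b, c = 0, 0, 0
--     for i in lt:
--         if i < a1:
--             a += 1
--         elif i < b1:
--             b += 1
--         elif i < c1:
--             c += 1
--         if a >= d and b >= d and c >= d:
--             return True
--     return False
-- ===== SOURCE B (Python) =====
-- def T_or_F(lt, d, a1, b1, c1):
--     a = sum(1 for i in lt if i < a1)
--     b = sum(1 for i in lt if a1 <= i < b1)
--     c = sum(1 for i in lt if b1 <= i < c1)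
--     return a >= d and b >= d and c >= d
-- ===== Notes on version B (the rewrite author's own statement) =====
-- stated objective: idiomatic
-- what changed: replaces the single-pass elif/early-exit loop with three independent full-scan bucket counts followed by one threshold check
-- intended difference: On the empty list with a non-positive threshold d, A returns False (the loop body never runs) while B returns True because a threshold d<=0 is vacuously met by zero counts, which is the intended meaning of the check. — e.g. on T_or_F([], 0, 1, 2, 3): A returns false, B returns true
import Mathlib
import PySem

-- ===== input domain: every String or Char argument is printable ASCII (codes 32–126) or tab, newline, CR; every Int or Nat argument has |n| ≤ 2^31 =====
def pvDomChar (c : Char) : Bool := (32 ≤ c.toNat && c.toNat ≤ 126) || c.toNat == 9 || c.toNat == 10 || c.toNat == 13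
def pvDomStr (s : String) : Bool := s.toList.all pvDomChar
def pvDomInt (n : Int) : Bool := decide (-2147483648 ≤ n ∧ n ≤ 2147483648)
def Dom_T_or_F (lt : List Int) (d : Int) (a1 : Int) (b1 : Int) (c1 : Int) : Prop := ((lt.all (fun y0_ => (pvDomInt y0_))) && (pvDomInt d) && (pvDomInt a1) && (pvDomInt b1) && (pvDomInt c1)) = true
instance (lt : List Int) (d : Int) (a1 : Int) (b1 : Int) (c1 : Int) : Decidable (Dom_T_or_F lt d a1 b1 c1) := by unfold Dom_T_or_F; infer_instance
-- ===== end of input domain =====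

-- B replaces A's single-pass elif/early-exit loop with three independent bucket-count scans and one final threshold check (idiomatic decomposition).


-- ===== PORT A =====
-- the for-loop with early return, as structural recursion over lt with the counters a b c
def T_or_F_go (d a1 b1 c1 : Int) : List Int → Int → Int → Int → Bool
  | [], _, _, _ => false
  | i :: rest, a, b, c =>
    let a' := if i < a1 then a + 1 else a
    let b' := if i < a1 then b else if i < b1 then b + 1 else b
    let c' := if i < a1 then c else if i < b1 then c else if i < c1 then c + 1 else c
    if a' ≥ d ∧ b' ≥ d ∧ c' ≥ d then true else T_or_F_go d a1 b1 c1 rest a' b' c'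

def T_or_F (lt : List Int) (d : Int) (a1 : Int) (b1 : Int) (c1 : Int) : Bool :=
  T_or_F_go d a1 b1 c1 lt 0 0 0

-- ===== PORT B =====
def T_or_F_alt (lt : List Int) (d : Int) (a1 : Int) (b1 : Int) (c1 : Int) : Bool :=
  let a : Int := lt.countP (fun i => decide (i < a1))
  let b : Int := lt.countP (fun i => decide (a1 ≤ i ∧ i < b1))
  let c : Int := lt.countP (fun i => decide (b1 ≤ i ∧ i < c1))
  decide (a ≥ d ∧ b ≥ d ∧ c ≥ d)

-- ===== PRECONDITION & SPEC =====
-- On the empty list with d ≤ 0, A returns False (the loop body never runs) while B returns True: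
-- a threshold d ≤ 0 is vacuously met by zero counts, which is the intended meaning of the check.
def D_T_or_F (lt : List Int) (d : Int) (a1 : Int) (b1 : Int) (c1 : Int) : Prop := lt = [] ∧ d ≤ 0
instance (lt : List Int) (d : Int) (a1 : Int) (b1 : Int) (c1 : Int) : Decidable (D_T_or_F lt d a1 b1 c1) := by unfold D_T_or_F; infer_instance

def Spec_T_or_F (lt : List Int) (d : Int) (a1 : Int) (b1 : Int) (c1 : Int) (out : Bool) : Prop := ¬ D_T_or_F lt d a1 b1 c1 → out = T_or_F_alt lt d a1 b1 c1
instance (lt : List Int) (d : Int) (a1 : Int) (b1 : Int) (c1 : Int) (out : Bool) : Decidable (Spec_T_or_F lt d a1 b1 c1 out) := by unfold Spec_T_or_F; infer_instance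

def pvDiffWitness_T_or_F : List Int × Int × Int × Int × Int := ([], 0, 1, 2, 3)
def pvDiffWitnessOut_T_or_F : Bool × Bool := (false, true)

-- ===== CLAIM (what is proved, stated in full; the proofs are below) =====
def Claim_unchanged_T_or_F : Prop := ∀ (lt : List Int) (d : Int) (a1 : Int) (b1 : Int) (c1 : Int), Dom_T_or_F lt d a1 b1 c1 → Spec_T_or_F lt d a1 b1 c1 (T_or_F lt d a1 b1 c1)
def Claim_changed_T_or_F : Prop := Dom_T_or_F (pvDiffWitness_T_or_F.1) (pvDiffWitness_T_or_F.2.1) (pvDiffWitness_T_or_F.2.2.1) (pvDiffWitness_T_or_F.2.2.2.1) (pvDiffWitness_T_or_F.2.2.2.2) ∧ D_T_or_F (pvDiffWitness_T_or_F.1) (pvDiffWitness_T_or_F.2.1) (pvDiffWitness_T_or_F.2.2.1) (pvDiffWitness_T_or_F.2.2.2.1) (pvDiffWitness_T_or_F.2.2.2.2) ∧ T_or_F (pvDiffWitness_T_or_F.1) (pvDiffWitness_T_or_F.2.1) (pvDiffWitness_T_or_F.2.2.1) (pvDiffWitness_T_or_F.2.2.2.1) (pvDiffWitness_T_or_F.2.2.2.2)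 = pvDiffWitnessOut_T_or_F.1 ∧ T_or_F_alt (pvDiffWitness_T_or_F.1) (pvDiffWitness_T_or_F.2.1) (pvDiffWitness_T_or_F.2.2.1) (pvDiffWitness_T_or_F.2.2.2.1) (pvDiffWitness_T_or_F.2.2.2.2) = pvDiffWitnessOut_T_or_F.2 ∧ pvDiffWitnessOut_T_or_F.1 ≠ pvDiffWitnessOut_T_or_F.2
def Claim_exact_T_or_F : Prop := ∀ (lt : List Int) (d : Int) (a1 : Int) (b1 : Int) (c1 : Int), Dom_T_or_F lt d a1 b1 c1 → D_T_or_F lt d a1 b1 c1 → T_or_F lt d a1 b1 c1 ≠ T_or_F_alt lt d a1 b1 c1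

-- ===== LEMMAS AND PROOFS =====

-- bucket counts of a list, as Ints (the final values B computes)
def cntA (a1 : Int) (l : List Int) : Int := l.countP (fun i => decide (i < a1))
def cntB (a1 b1 : Int) (l : List Int) : Int := l.countP (fun i => decide (a1 ≤ i ∧ i < b1))
-- A's elif third bucket (requires a1 ≤ i as well); B's plain bucket is cntC'
def cntC (a1 b1 c1 : Int) (l : List Int) : Int := l.countP (fun i => decide (a1 ≤ i ∧ b1 ≤ i ∧ i < c1))
def cntC' (b1 c1 : Int) (l : List Int) : Int := l.countP (fun i => decide (b1 ≤ i ∧ i < c1))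

theorem cnt_nonneg {p : Int → Bool} (l : List Int) : (0 : Int) ≤ (l.countP p : Int) := by
  exact_mod_cast Nat.zero_le _

-- the loop invariant: as long as the check has not yet fired, the loop returns true
-- iff the FINAL counts (current counters plus the counts of the remainder) all reach d
theorem go_eq (d a1 b1 c1 : Int) (l : List Int) :
    ∀ a b c : Int, ¬ (a ≥ d ∧ b ≥ d ∧ c ≥ d) →
      T_or_F_go d a1 b1 c1 l a b c =
        decide (a + cntA a1 l ≥ d ∧ b + cntB a1 b1 l ≥ d ∧ c + cntC a1 b1 c1 l ≥ d) := by
  induction l with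
  | nil =>
    intro a b c h
    simp [T_or_F_go, cntA, cntB, cntC, List.countP]
    omega
  | cons i rest ih =>
    intro a b c _
    have hA : cntA a1 (i :: rest) = (if i < a1 then (1:Int) else 0) + cntA a1 rest := by
      simp only [cntA, List.countP_cons, decide_eq_true_eq]
      split_ifs <;> push_cast <;> omega
    have hB : cntB a1 b1 (i :: rest) = (if a1 ≤ i ∧ i < b1 then (1:Int) else 0) + cntB a1 b1 rest := by
      simp only [cntB, List.countP_cons, decide_eq_true_eq]
      split_ifs <;> push_cast <;> omega
    have hC : cntC a1 b1 c1 (i :: rest) = (if a1 ≤ i ∧ b1 ≤ i ∧ i < c1 then (1:Int) else 0) + cntC a1 b1 c1 rest := by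
      simp only [cntC, List.countP_cons, decide_eq_true_eq]
      split_ifs <;> push_cast <;> omega
    show (let a' := if i < a1 then a + 1 else a
          let b' := if i < a1 then b else if i < b1 then b + 1 else b
          let c' := if i < a1 then c else if i < b1 then c else if i < c1 then c + 1 else c
          if a' ≥ d ∧ b' ≥ d ∧ c' ≥ d then true else T_or_F_go d a1 b1 c1 rest a' b' c') = _
    set a' := if i < a1 then a + 1 else a with ha'
    set b' := if i < a1 then b else if i < b1 then b + 1 else b with hb'
    set c' := if i < a1 then c else if i < b1 then c else if i < c1 then c + 1 else c with hc'
    have hs1 : a' + cntA a1 rest = a + cntA a1 (i :: rest) := by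
      rw [ha', hA]; split_ifs <;> omega
    have hs2 : b' + cntB a1 b1 rest = b + cntB a1 b1 (i :: rest) := by
      rw [hb', hB]; split_ifs <;> omega
    have hs3 : c' + cntC a1 b1 c1 rest = c + cntC a1 b1 c1 (i :: rest) := by
      rw [hc', hC]; split_ifs <;> omega
    have hstep : a' + cntA a1 rest = a + cntA a1 (i :: rest) ∧
        b' + cntB a1 b1 rest = b + cntB a1 b1 (i :: rest) ∧
        c' + cntC a1 b1 c1 rest = c + cntC a1 b1 c1 (i :: rest) := ⟨hs1, hs2, hs3⟩
    by_cases hchk : a' ≥ d ∧ b' ≥ d ∧ c' ≥ d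
    · -- the loop returns true here; the final counts also all reach d (counts are monotone)
      have h1 := cnt_nonneg (p := fun i => decide (i < a1)) rest
      have h2 := cnt_nonneg (p := fun i => decide (a1 ≤ i ∧ i < b1)) rest
      have h3 := cnt_nonneg (p := fun i => decide (a1 ≤ i ∧ b1 ≤ i ∧ i < c1)) rest
      simp only [hchk]
      have : a + cntA a1 (i :: rest) ≥ d ∧ b + cntB a1 b1 (i :: rest) ≥ d ∧
             c + cntC a1 b1 c1 (i :: rest) ≥ d := by
        refine ⟨?_, ?_, ?_⟩ <;>
          [rw [← hstep.1]; rw [← hstep.2.1]; rw [← hstep.2.2]] <;>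
          simp only [cntA, cntB, cntC] at * <;> omega
      simp [this.1, this.2.1, this.2.2]
    · simp only [hchk, if_false, ih a' b' c' hchk, hstep.1, hstep.2.1, hstep.2.2]
  
-- when b1 < a1 the two third-bucket counts can differ, but then the b-bucket is empty,
-- so for d ≥ 1 the final boolean is false either way; for a1 ≤ b1 the buckets coincide
theorem bridge (lt : List Int) (d a1 b1 c1 : Int) (hd : 1 ≤ d) :
    decide (cntA a1 lt ≥ d ∧ cntB a1 b1 lt ≥ d ∧ cntC a1 b1 c1 lt ≥ d) =
    decide (cntA a1 lt ≥ d ∧ cntB a1 b1 lt ≥ d ∧ cntC' b1 c1 lt ≥ d) := by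
  by_cases hord : a1 ≤ b1
  · have : cntC a1 b1 c1 lt = cntC' b1 c1 lt := by
      simp only [cntC, cntC']
      congr 1
      exact List.countP_congr (fun i _ => by simp only [decide_eq_true_eq]; omega)
    rw [this]
  · have hB0 : cntB a1 b1 lt = 0 := by
      simp only [cntB]
      norm_cast
      rw [List.countP_eq_zero]
      intro i _
      simp only [decide_eq_true_eq]
      omega
    rw [decide_eq_decide, hB0]
    constructor <;> intro hh <;> omega

theorem T_or_F_eq_alt (lt : List Int) (d a1 b1 c1 : Int) (h : ¬ (lt = [] ∧ d ≤ 0)) :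
    T_or_F lt d a1 b1 c1 = T_or_F_alt lt d a1 b1 c1 := by
  by_cases hd : d ≤ 0
  · -- d ≤ 0 and lt nonempty: A fires the check on the first element; all B's counts are ≥ 0 ≥ d
    cases lt with
    | nil => exact absurd ⟨rfl, hd⟩ h
    | cons i rest =>
      have h1 := cnt_nonneg (p := fun i => decide (i < a1)) (i :: rest)
      have h2 := cnt_nonneg (p := fun i => decide (a1 ≤ i ∧ i < b1)) (i :: rest)
      have h3 := cnt_nonneg (p := fun i => decide (b1 ≤ i ∧ i < c1)) (i :: rest)
      have hB : T_or_F_alt (i :: rest) d a1 b1 c1 = true := by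
        simp only [T_or_F_alt, decide_eq_true_iff]
        refine ⟨by omega, by omega, by omega⟩
      rw [hB]
      -- in A, after the first element the check a' ≥ d ∧ b' ≥ d ∧ c' ≥ d holds (d ≤ 0, counters ≥ 0)
      show (if (if i < a1 then (0:Int) + 1 else 0) ≥ d ∧
              (if i < a1 then (0:Int) else if i < b1 then 0 + 1 else 0) ≥ d ∧
              (if i < a1 then (0:Int) else if i < b1 then 0 else if i < c1 then 0 + 1 else 0) ≥ d
            then true
            else T_or_F_go d a1 b1 c1 rest (if i < a1 then (0:Int) + 1 else 0)
                   (if i < a1 then (0:Int) else if i < b1 then 0 + 1 else 0)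
                   (if i < a1 then (0:Int) else if i < b1 then 0 else if i < c1 then 0 + 1 else 0)) = true
      split_ifs <;> first | rfl | (exfalso; omega)
  · -- d ≥ 1: the initial counters fail the check, so the invariant lemma applies
    have h0 : ¬ ((0:Int) ≥ d ∧ (0:Int) ≥ d ∧ (0:Int) ≥ d) := by omega
    show T_or_F_go d a1 b1 c1 lt 0 0 0 = _
    rw [go_eq d a1 b1 c1 lt 0 0 0 h0]
    simp only [zero_add]
    rw [bridge lt d a1 b1 c1 (by omega)]
    rfl

-- ===== VERDICT (by name: the statement is the Claim_ definition above) =====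
theorem T_or_F_spec : Claim_unchanged_T_or_F := by
  intro lt d a1 b1 c1 _ hD
  exact T_or_F_eq_alt lt d a1 b1 c1 hD

theorem T_or_F_changed : Claim_changed_T_or_F := by unfold Claim_changed_T_or_F; decide

theorem T_or_F_tight : Claim_exact_T_or_F := by
  intro lt d a1 b1 c1 _ hD
  obtain ⟨hnil, hd⟩ := hD
  subst hnil
  have hA : T_or_F [] d a1 b1 c1 = false := rfl
  have hB : T_or_F_alt [] d a1 b1 c1 = true := by
    simp only [T_or_F_alt, decide_eq_true_iff]
    refine ⟨?_, ?_, ?_⟩ <;> simp [List.countP] <;> omega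
  rw [hA, hB]; decide
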